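-- pv_equiv track=rewrite | github.com/AndrewGluss/Python | effective_clerk.py | series_day_work
-- ===== SOURCE A (Python) =====
-- def series_day_work(works):
--     """
--     Функция возвращает True, если в выполнении каждой задачи не было перерывов
--     и False если серия дней на выполнение одной задачи прервалась
--     """
--     works_copy = works
--     dict_works = dict() # создаем словарь в котором ключ - задача, значение - количество потраченных дней без перерыва
--     current_task = works_copy[0] # текущая задача
--     dict_works[current_task] = 1
--     sum_days = 0 # суммарное количество дней
--     for i in range(1, len(works_copy)):
--         # если задача равна текущей и есть в словаре
--         if works_copy[i] == current_task and works_copy[i] in dict_works: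
--             # прибавляем к серии дней 1
--             dict_works[current_task] = dict_works.setdefault(current_task, 0) + 1
--         # если задача не равна текущей и её нет в словаре
--         elif works_copy[i] != current_task and works_copy[i] not in dict_works:
--             # задачу текущей
--             current_task = works_copy[i]
--             # добавляем в словарь
--             dict_works[current_task] = dict_works.setdefault(current_task, 0) + 1
--         # если задача не равна текущей и присутсвует в словаре, то серия прервалась
--         elif works_copy[i] != current_task and works_copy[i] in dict_works:
--             break
--     for values in dict_works.values():
--         sum_days += values
--     if sum_days == len(works_copy):
--         return True
--     else:
--         return False
-- ===== SOURCE B (Python) =====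
-- def series_day_work(works):
--     keys = [works[0]]
--     for w in works[1:]:
--         if w != keys[-1]:
--             keys.append(w)
--     return len(keys) == len(set(keys))
-- ===== Notes on version B (the rewrite author's own statement) =====
-- stated objective: simpler
-- what changed: Replaces the dict of per-task day counts with break-driven control flow by collecting the list of run keys (one per maximal block) and checking that they are pairwise distinct; the dict, the day summation and the final sum==len comparison disappear.
import Mathlib
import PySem

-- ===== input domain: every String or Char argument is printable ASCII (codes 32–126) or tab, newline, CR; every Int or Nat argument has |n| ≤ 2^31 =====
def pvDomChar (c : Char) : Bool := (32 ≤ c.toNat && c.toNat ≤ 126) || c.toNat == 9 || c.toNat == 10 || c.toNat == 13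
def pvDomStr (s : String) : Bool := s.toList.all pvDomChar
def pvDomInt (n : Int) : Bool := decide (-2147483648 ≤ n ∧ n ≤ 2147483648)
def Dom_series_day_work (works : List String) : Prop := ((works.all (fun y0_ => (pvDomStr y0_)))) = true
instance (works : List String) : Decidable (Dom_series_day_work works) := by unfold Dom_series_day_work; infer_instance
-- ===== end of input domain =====

-- B replaces A's dict of per-task day counts (with a break on a repeated task) by the list of
-- run keys, returning whether they are pairwise distinct: simpler, same O(n).
-- Both Pythons raise IndexError on [] (works[0]); Pre_ excludes exactly that input.

-- ===== PORT A =====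
-- A's for-loop over range(1, len(works)) visiting works[i], with its three branches and break.
def pvALoop (rest : List String) (cur : String) (d : PySem.Dict String Int) :
    PySem.Dict String Int :=
  match rest with
  | [] => d
  | w :: rest' =>
    if w == cur && d.contains w then
      let d' := d.setdefault cur 0
      pvALoop rest' cur (d'.insert cur (d'.getD cur 0 + 1))
    else if w != cur && !d.contains w then
      let d' := d.setdefault w 0
      pvALoop rest' w (d'.insert w (d'.getD w 0 + 1))
    else if w != cur && d.contains w then
      d  -- break
    else
      pvALoop rest' cur d

def series_day_work (works : List String) : Bool :=
  let current_task := (PySem.List.pyGet? works 0).getD ""   -- works[0]; IndexError on [] excluded by Pre_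
  let dict_works := (PySem.Dict.empty : PySem.Dict String Int).insert current_task 1
  let dict_works := pvALoop (works.drop 1) current_task dict_works
  let sum_days := dict_works.values.foldl (· + ·) 0
  if sum_days = (works.length : Int) then true else false

-- ===== PORT B =====
-- the loop body: append w to the run-key list when it differs from keys[-1]
def pvStep (ks : List String) (w : String) : List String :=
  if w ≠ (PySem.List.pyGet? ks (-1)).getD "" then ks ++ [w] else ks

def series_day_work_alt (works : List String) : Bool :=
  let first := (PySem.List.pyGet? works 0).getD ""          -- works[0]; IndexError on [] excluded by Pre_
  let keys := (works.drop 1).foldl pvStep [first]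
  decide (keys.length = (PySem.Set.ofList keys).length)

-- ===== PRECONDITION & SPEC =====
-- Pre_ excludes only the empty list, where both A and B raise IndexError on works[0].
def Pre_series_day_work (works : List String) : Prop := works ≠ []
instance (works : List String) : Decidable (Pre_series_day_work works) := by
  unfold Pre_series_day_work; infer_instance
def pvWitness_series_day_work : List String := ["a", "a", "b"]

def Spec_series_day_work (works : List String) (out : Bool) : Prop := out = series_day_work_alt works
instance (works : List String) (out : Bool) : Decidable (Spec_series_day_work works out) := by unfold Spec_series_day_work; infer_instance

-- ===== CLAIM (what is proved, stated in full; the proofs are below) =====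
def Claim_equal_series_day_work : Prop := ∀ (works : List String), Dom_series_day_work works → Pre_series_day_work works → Spec_series_day_work works (series_day_work works)

-- ===== LEMMAS AND PROOFS =====

-- shared characterisation: the run-key scan succeeds iff no run key repeats
def pvOk (rest : List String) (cur : String) (seen : List String) : Bool :=
  match rest with
  | [] => true
  | w :: rest' =>
    if w = cur then pvOk rest' cur seen
    else if w ∈ seen then false
    else pvOk rest' w (seen ++ [w])

-- last element of ks ++ [w] as Python's ks[-1]
theorem pv_last_concat (ks : List String) (w : String) :
    (PySem.List.pyGet? (ks ++ [w]) (-1)).getD "" = w := by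
  simp [PySem.List.pyGet?, PySem.List.pyIdx?]

theorem pv_map_overwrite_id (k : String) (v : Int) :
    ∀ (l : List (String × Int)), k ∉ l.map (fun p => p.1) →
    l.map (fun p => if (p.1 == k) = true then (k, v) else p) = l := by
  intro l
  induction l with
  | nil => intro _; rfl
  | cons p t ih =>
    intro h
    simp only [List.map_cons, List.mem_cons, not_or] at h ⊢
    rw [if_neg (by simp [Ne.symm h.1]), ih h.2]

theorem pv_sum_snd_overwrite (k : String) (v w : Int) :
    ∀ (l : List (String × Int)), (l.map (fun p => p.1)).Nodup → (k, w) ∈ l →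
    ((l.map (fun p => if (p.1 == k) = true then (k, v) else p)).map (fun p => p.2)).sum
      = (l.map (fun p => p.2)).sum + v - w := by
  intro l
  induction l with
  | nil => intro _ h; cases h
  | cons p t ih =>
    intro hnd hmem
    simp only [List.map_cons, List.nodup_cons] at hnd
    rcases List.mem_cons.mp hmem with hp | hp
    · subst hp
      rw [List.map_cons, pv_map_overwrite_id k v t hnd.1]
      simp only [List.map_cons, List.sum_cons]
      simp
      ring
    · have hk : k ∈ t.map (fun p => p.1) := List.mem_map.mpr ⟨(k, w), hp, rfl⟩
      have hne : ¬ ((p.1 == k) = true) := by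
        simp only [beq_iff_eq]; intro e; exact hnd.1 (e ▸ hk)
      simp only [List.map_cons, if_neg hne, List.sum_cons, ih hnd.2 hp]
      ring

theorem pv_sumv_insert_existing (d : PySem.Dict String Int) (k : String)
    (hnd : d.keys.Nodup) (hk : d.contains k = true) :
    (d.insert k (d.getD k 0 + 1)).values.sum = d.values.sum + 1 := by
  obtain ⟨w, hw⟩ : ∃ w, d.get? k = some w := by
    rw [PySem.Dict.contains_eq_isSome_get?] at hk
    exact Option.isSome_iff_exists.mp hk
  have hmem : (k, w) ∈ d.items := PySem.Dict.mem_items_of_get?_eq_some d hw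
  have hit := PySem.Dict.items_insert_of_contains d (d.getD k 0 + 1) hk
  have hnd' : (d.items.map (fun p => p.1)).Nodup := by
    simpa only [PySem.Dict.keys] using hnd
  simp only [PySem.Dict.values, hit]
  have hgetD : d.getD k 0 = w := PySem.Dict.getD_of_mem_items d hmem hnd 0
  rw [hgetD, pv_sum_snd_overwrite k (w + 1) w d.items hnd' hmem]
  ring

theorem pv_sumv_insert_fresh (d : PySem.Dict String Int) (k : String) (v : Int)
    (hk : d.contains k = false) :
    (d.insert k v).values.sum = d.values.sum + v := by
  simp [PySem.Dict.values, PySem.Dict.items_insert_of_not_contains d v hk]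

theorem pv_aLoop_sum : ∀ (rest : List String) (cur : String) (d : PySem.Dict String Int),
    d.keys.Nodup → cur ∈ d.keys →
    (if pvOk rest cur d.keys then
      (pvALoop rest cur d).values.sum = d.values.sum + (rest.length : Int)
    else
      (pvALoop rest cur d).values.sum < d.values.sum + (rest.length : Int)) := by
  intro rest
  induction rest with
  | nil => intro cur d _ _; simp [pvALoop, pvOk]
  | cons w rest ih =>
    intro cur d hnd hcur
    have hcc : d.contains cur = true := (PySem.Dict.contains_iff_mem_keys d cur).mpr hcur
    by_cases hwc : w = cur
    · subst hwc
      have hA : pvALoop (w :: rest) w d = pvALoop rest w (d.insert w (d.getD w 0 + 1)) := by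
        simp [pvALoop, hcc, PySem.Dict.setdefault_of_contains d 0 hcc]
      have hO : pvOk (w :: rest) w d.keys = pvOk rest w d.keys := by simp [pvOk]
      have hkeys : (d.insert w (d.getD w 0 + 1)).keys = d.keys :=
        PySem.Dict.keys_insert_of_contains d _ hcc
      have hsum := pv_sumv_insert_existing d w hnd hcc
      have h2 := ih w (d.insert w (d.getD w 0 + 1)) (by rw [hkeys]; exact hnd)
        (by rw [hkeys]; exact hcur)
      rw [hkeys, hsum] at h2
      rw [hA, hO]
      by_cases hok : pvOk rest w d.keys = true
      · rw [if_pos hok] at h2 ⊢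
        rw [h2]
        simp only [List.length_cons]
        push_cast; ring
      · rw [if_neg hok] at h2 ⊢
        simp only [List.length_cons]
        push_cast
        omega
    · by_cases hwk : w ∈ d.keys
      · have hcw : d.contains w = true := (PySem.Dict.contains_iff_mem_keys d w).mpr hwk
        have hA : pvALoop (w :: rest) cur d = d := by
          simp [pvALoop, hwc, hcw]
        have hO : pvOk (w :: rest) cur d.keys = false := by
          simp [pvOk, hwc, hwk]
        rw [hA, hO]
        simp only [Bool.false_eq_true, if_false, List.length_cons]
        push_cast
        omega
      · have hcw : d.contains w = false := by
          rw [← Bool.not_eq_true]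
          exact fun h => hwk ((PySem.Dict.contains_iff_mem_keys d w).mp h)
        have hstep : (d.setdefault w 0).insert w ((d.setdefault w 0).getD w 0 + 1)
            = d.insert w 1 := by
          rw [PySem.Dict.setdefault_of_not_contains d 0 hcw,
            PySem.Dict.getD_insert_self, PySem.Dict.insert_insert_self]
          norm_num
        have hA : pvALoop (w :: rest) cur d = pvALoop rest w (d.insert w 1) := by
          simp [pvALoop, hwc, hcw, hstep]
        have hO : pvOk (w :: rest) cur d.keys = pvOk rest w (d.keys ++ [w]) := by
          simp [pvOk, hwc, hwk]
        have hkeys : (d.insert w 1).keys = d.keys ++ [w] :=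
          PySem.Dict.keys_insert_of_not_contains d 1 hcw
        have hsum : (d.insert w 1).values.sum = d.values.sum + 1 :=
          pv_sumv_insert_fresh d w 1 hcw
        have h2 := ih w (d.insert w 1) (PySem.Dict.nodup_keys_insert d w 1 hnd)
          (by rw [hkeys]; simp)
        rw [hkeys, hsum] at h2
        rw [hA, hO]
        by_cases hok : pvOk rest w (d.keys ++ [w]) = true
        · rw [if_pos hok] at h2 ⊢
          rw [h2]
          simp only [List.length_cons]
          push_cast; ring
        · rw [if_neg hok] at h2 ⊢
          simp only [List.length_cons]
          push_cast
          omega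

theorem pv_d0_keys (h : String) :
    ((PySem.Dict.empty : PySem.Dict String Int).insert h 1).keys = [h] := by
  rw [PySem.Dict.keys_insert_of_not_contains _ 1 (PySem.Dict.contains_empty h)]
  simp [PySem.Dict.keys_empty]

theorem pv_A_eq_ok (h : String) (t : List String) :
    series_day_work (h :: t) = pvOk t h [h] := by
  unfold series_day_work
  have hget : (PySem.List.pyGet? (h :: t) 0).getD "" = h := by
    simp [PySem.List.pyGet?, PySem.List.pyIdx?]
  simp only [hget, List.drop_succ_cons, List.drop_zero]
  have hd0k := pv_d0_keys h
  have hsum0 : ((PySem.Dict.empty : PySem.Dict String Int).insert h 1).values.sum = 1 := by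
    rw [pv_sumv_insert_fresh _ h 1 (PySem.Dict.contains_empty h)]
    simp [PySem.Dict.values, PySem.Dict.empty]
  have hfold : ∀ (l : List Int), l.foldl (· + ·) 0 = l.sum := by
    intro l
    have := PySem.List.foldl_add l (fun x => x) 0
    simpa using this
  have h2 := pv_aLoop_sum t h ((PySem.Dict.empty : PySem.Dict String Int).insert h 1)
    (by rw [hd0k]; simp) (by rw [hd0k]; simp)
  rw [hd0k, hsum0] at h2
  rw [hfold]
  by_cases hok : pvOk t h [h] = true
  · rw [if_pos hok] at h2
    rw [hok, if_pos]
    rw [h2]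
    simp only [List.length_cons]
    push_cast; ring
  · rw [if_neg hok] at h2
    rw [Bool.not_eq_true] at hok
    rw [hok, if_neg]
    intro e
    rw [e] at h2
    simp only [List.length_cons] at h2
    push_cast at h2
    omega

-- ===== B side =====
theorem pv_step_sublist : ∀ (t : List String) (ks : List String),
    ks.Sublist (t.foldl pvStep ks) := by
  intro t
  induction t with
  | nil => intro ks; simp
  | cons w t ih =>
    intro ks
    have h1 : ks.Sublist (pvStep ks w) := by
      unfold pvStep; split
      · exact List.sublist_append_left ks [w]
      · exact List.Sublist.refl ks
    exact h1.trans (ih (pvStep ks w))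

theorem pv_foldl_step_ok : ∀ (t ks₀ : List String) (l : String), (ks₀ ++ [l]).Nodup →
    decide ((t.foldl pvStep (ks₀ ++ [l])).Nodup) = pvOk t l (ks₀ ++ [l]) := by
  intro t
  induction t with
  | nil => intro ks₀ l hnd; simp [pvOk, hnd]
  | cons w t ih =>
    intro ks₀ l hnd
    simp only [List.foldl_cons]
    by_cases hwl : w = l
    · have hs : pvStep (ks₀ ++ [l]) w = ks₀ ++ [l] := by
        unfold pvStep; rw [pv_last_concat, if_neg (by simp [hwl])]
      simp only [hs, ih ks₀ l hnd, pvOk, if_pos hwl]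
    · have hs : pvStep (ks₀ ++ [l]) w = (ks₀ ++ [l]) ++ [w] := by
        unfold pvStep; rw [pv_last_concat, if_pos hwl]
      simp only [hs]
      by_cases hwm : w ∈ ks₀ ++ [l]
      · have hO : pvOk (w :: t) l (ks₀ ++ [l]) = false := by
          simp only [pvOk, if_neg hwl]
          simp [hwm]
        rw [hO]
        have hnotnd : ¬ ((ks₀ ++ [l]) ++ [w]).Nodup := by
          intro hn
          rcases (List.nodup_append.mp hn) with ⟨_, _, hdisj⟩
          exact hdisj w hwm w (by simp) rfl
        have hres : ¬ (t.foldl pvStep ((ks₀ ++ [l]) ++ [w])).Nodup :=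
          fun hn => hnotnd (hn.sublist (pv_step_sublist t _))
        exact decide_eq_false hres
      · have hnd' : ((ks₀ ++ [l]) ++ [w]).Nodup := by
          rw [List.nodup_append]
          refine ⟨hnd, List.nodup_singleton w, fun a ha b hb e => ?_⟩
          simp only [List.mem_singleton] at hb
          subst hb; subst e; exact hwm ha
        rw [ih (ks₀ ++ [l]) w hnd']
        simp only [pvOk, if_neg hwl]
        simp [hwm]

theorem pv_len_ofList_eq_iff : ∀ (xs : List String),
    (xs.length = (PySem.Set.ofList xs).length) ↔ xs.Nodup := by
  intro xs
  induction xs using List.reverseRecOn with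
  | nil => simp [PySem.Set.ofList]
  | append_singleton xs x ih =>
    rw [PySem.Set.ofList_append_singleton]
    by_cases hx : x ∈ xs
    · rw [PySem.Set.add_of_mem ((PySem.Set.mem_ofList xs x).mpr hx)]
      have hle := PySem.Set.length_ofList_le xs
      constructor
      · intro h; simp only [List.length_append, List.length_singleton] at h; omega
      · intro h
        rcases (List.nodup_append.mp h) with ⟨_, _, hdisj⟩
        exact (hdisj x hx x (by simp) rfl).elim
    · rw [PySem.Set.add_of_not_mem ((fun hm => hx ((PySem.Set.mem_ofList xs x).mp hm)))]
      simp only [List.length_append, List.length_singleton]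
      rw [List.nodup_append]
      constructor
      · intro h
        refine ⟨ih.mp (by omega), List.nodup_singleton x, fun a ha b hb e => ?_⟩
        simp only [List.mem_singleton] at hb
        subst hb; subst e; exact hx ha
      · rintro ⟨h1, _, _⟩; have := ih.mpr h1; omega

theorem pv_B_eq_ok (h : String) (t : List String) :
    series_day_work_alt (h :: t) = pvOk t h [h] := by
  unfold series_day_work_alt
  have hget : (PySem.List.pyGet? (h :: t) 0).getD "" = h := by
    simp [PySem.List.pyGet?, PySem.List.pyIdx?]
  simp only [hget, List.drop_succ_cons, List.drop_zero]
  have hok := pv_foldl_step_ok t [] h (by simp)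
  simp only [List.nil_append] at hok
  rw [← hok]
  rcases Decidable.em ((t.foldl pvStep [h]).Nodup) with hn | hn
  · simp [hn, (pv_len_ofList_eq_iff _).mpr hn]
  · have hne : ¬ ((t.foldl pvStep [h]).length = (PySem.Set.ofList (t.foldl pvStep [h])).length) :=
      fun e => hn ((pv_len_ofList_eq_iff _).mp e)
    simp [hn, hne]

-- ===== VERDICT (by name: the statement is the Claim_ definition above) =====
theorem series_day_work_spec : Claim_equal_series_day_work := by
  intro works _ hpre
  cases works with
  | nil => exact absurd rfl hpre
  | cons h t =>
    unfold Spec_series_day_work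
    rw [pv_A_eq_ok, pv_B_eq_ok]
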